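-- pv_equiv track=rewrite | github.com/md-labs/Clinical_Hedges_BERT | src/Data_Extraction_And_PreProcessing/Create_CrossValidation_Data_All_Models.py | filterLabelsTask3
-- ===== SOURCE A (Python) =====
-- def filterLabelsTask2(task1, task2):
--     filter1_labels = ['NA',]
--     result = []
--     task1Dict = dict()
--     for row in task1:
--         if(row[2] in filter1_labels):
--             task1Dict[row[0]] = 1
--     for row in task2:
--         if(row[0] not in task1Dict):
--             result.append(row)
--     return result
--
-- def filterLabelsTask3(task1, task2, task3):
--     task3 = filterLabelsTask2(task1, task3)
--     filter2_labels = ['F']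
--     result = []
--     task2Dict = dict()
--     for row in task2:
--         if(row[2] in filter2_labels):
--             task2Dict[row[0]] = 1
--     for row in task3:
--         if(row[0] not in task2Dict):
--             result.append(row)
--     return result
-- ===== SOURCE B (Python) =====
-- def filterLabelsTask3(task1, task2, task3):
--     excluded = {row[0] for row in task1 if row[2] == 'NA'} | {row[0] for row in task2 if row[2] == 'F'}
--     return [row for row in task3 if row[0] not in excluded]
-- ===== Notes on version B (the rewrite author's own statement) =====
-- stated objective: simpler
-- what changed: Replaces A's two sequential filter passes (each building an intermediate dict and an intermediate list) with two set-comprehension exclusion indexes unioned once and a single comprehension pass over task3.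
import Mathlib
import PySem

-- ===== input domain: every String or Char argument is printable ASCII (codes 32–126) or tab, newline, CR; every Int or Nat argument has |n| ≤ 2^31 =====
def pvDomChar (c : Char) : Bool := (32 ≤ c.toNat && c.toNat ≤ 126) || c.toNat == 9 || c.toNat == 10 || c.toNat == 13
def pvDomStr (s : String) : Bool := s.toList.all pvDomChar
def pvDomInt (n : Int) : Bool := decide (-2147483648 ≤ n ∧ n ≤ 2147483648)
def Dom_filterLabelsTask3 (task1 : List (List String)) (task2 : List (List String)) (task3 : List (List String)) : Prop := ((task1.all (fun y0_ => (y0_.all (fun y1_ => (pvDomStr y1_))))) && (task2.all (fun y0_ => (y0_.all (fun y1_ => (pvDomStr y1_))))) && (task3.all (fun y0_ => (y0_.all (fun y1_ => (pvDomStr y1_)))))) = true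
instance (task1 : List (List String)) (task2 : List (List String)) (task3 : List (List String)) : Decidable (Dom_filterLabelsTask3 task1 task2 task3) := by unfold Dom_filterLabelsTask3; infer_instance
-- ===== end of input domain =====

-- ===== PORT A =====
-- Port of A, step for step: filterLabelsTask2 (dict of task1 ids labelled 'NA', then a filter
-- pass over its second argument), then the same pattern for 'F' labels from task2.
-- B changes only the decomposition: two exclusion sets built by comprehensions, one combined pass
-- over task3 (objective: simpler); same asymptotic cost.
def filterLabelsTask2A (task1 : List (List String)) (task2 : List (List String)) : List (List String) :=
  let task1Dict : PySem.Dict String Int :=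
    task1.foldl (fun d row =>
      if PySem.List.pyGetD row 2 "" ∈ ["NA"] then d.insert (PySem.List.pyGetD row 0 "") 1 else d)
      PySem.Dict.empty
  task2.foldl (fun result row =>
    if ¬ (task1Dict.contains (PySem.List.pyGetD row 0 "") = true) then result ++ [row] else result) []

def filterLabelsTask3 (task1 : List (List String)) (task2 : List (List String)) (task3 : List (List String)) : List (List String) :=
  let task3' := filterLabelsTask2A task1 task3
  let task2Dict : PySem.Dict String Int :=
    task2.foldl (fun d row =>
      if PySem.List.pyGetD row 2 "" ∈ ["F"] then d.insert (PySem.List.pyGetD row 0 "") 1 else d)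
      PySem.Dict.empty
  task3'.foldl (fun result row =>
    if ¬ (task2Dict.contains (PySem.List.pyGetD row 0 "") = true) then result ++ [row] else result) []

-- ===== PORT B =====
def filterLabelsTask3_alt (task1 : List (List String)) (task2 : List (List String)) (task3 : List (List String)) : List (List String) :=
  let excluded : PySem.Set String :=
    PySem.Set.union
      (PySem.Set.ofList ((task1.filter (fun row => PySem.List.pyGetD row 2 "" == "NA")).map
        (fun row => PySem.List.pyGetD row 0 "")))
      ((task2.filter (fun row => PySem.List.pyGetD row 2 "" == "F")).map
        (fun row => PySem.List.pyGetD row 0 ""))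
  task3.filter (fun row => !(PySem.Set.contains excluded (PySem.List.pyGetD row 0 "")))

-- ===== PRECONDITION & SPEC =====
-- Pre_: exactly where the Python A returns: every task1/task2 row has indices 0 and 2
-- (length >= 3) and every task3 row has index 0 (length >= 1); otherwise A raises IndexError.
def Pre_filterLabelsTask3 (task1 : List (List String)) (task2 : List (List String)) (task3 : List (List String)) : Prop :=
  (∀ row ∈ task1, 3 ≤ row.length) ∧ (∀ row ∈ task2, 3 ≤ row.length) ∧ (∀ row ∈ task3, 1 ≤ row.length)
instance (task1 : List (List String)) (task2 : List (List String)) (task3 : List (List String)) : Decidable (Pre_filterLabelsTask3 task1 task2 task3) := by unfold Pre_filterLabelsTask3; infer_instance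

def pvWitness_filterLabelsTask3 : List (List String) × List (List String) × List (List String) :=
  ([["1", "t", "NA"]], [["2", "t", "F"]], [["1"], ["2"], ["3"]])

def Spec_filterLabelsTask3 (task1 : List (List String)) (task2 : List (List String)) (task3 : List (List String)) (out : List (List String)) : Prop := out = filterLabelsTask3_alt task1 task2 task3
instance (task1 : List (List String)) (task2 : List (List String)) (task3 : List (List String)) (out : List (List String)) : Decidable (Spec_filterLabelsTask3 task1 task2 task3 out) := by unfold Spec_filterLabelsTask3; infer_instance

-- ===== CLAIM (what is proved, stated in full; the proofs are below) =====
def Claim_equal_filterLabelsTask3 : Prop := ∀ (task1 : List (List String)) (task2 : List (List String)) (task3 : List (List String)), Dom_filterLabelsTask3 task1 task2 task3 → Pre_filterLabelsTask3 task1 task2 task3 → Spec_filterLabelsTask3 task1 task2 task3 (filterLabelsTask3 task1 task2 task3)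

-- ===== LEMMAS AND PROOFS =====

-- the conditional-insert dict loop: membership among keys = membership in the filtered id list
theorem contains_dict_fold (lab : String) (l : List (List String)) (d : PySem.Dict String Int) (k : String) :
    (l.foldl (fun d row =>
      if PySem.List.pyGetD row 2 "" = lab then d.insert (PySem.List.pyGetD row 0 "") 1 else d) d).contains k
    = (decide (k ∈ (l.filter (fun row => PySem.List.pyGetD row 2 "" == lab)).map
        (fun row => PySem.List.pyGetD row 0 "")) || d.contains k) := by
  induction l generalizing d with
  | nil => simp
  | cons row rest ih =>
    rw [List.foldl_cons]
    by_cases h : PySem.List.pyGetD row 2 "" = lab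
    · rw [if_pos h, ih]
      rw [List.filter_cons_of_pos (by simp [h]), List.map_cons]
      simp only [PySem.Dict.contains_insert]
      by_cases hk : k = PySem.List.pyGetD row 0 "" <;>
        simp [hk, List.mem_cons, Bool.or_comm, Bool.or_assoc]
    · rw [if_neg h, ih, List.filter_cons_of_neg (by simp [h])]

theorem filterLabelsTask3_spec_aux (task1 task2 task3 : List (List String)) :
    filterLabelsTask3 task1 task2 task3 = filterLabelsTask3_alt task1 task2 task3 := by
  unfold filterLabelsTask3 filterLabelsTask2A filterLabelsTask3_alt
  simp only [List.mem_singleton]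
  rw [PySem.List.foldl_append_ite_eq_filter, PySem.List.foldl_append_ite_eq_filter]
  simp only [List.nil_append, List.filter_filter]
  apply List.filter_congr
  intro row _
  rw [contains_dict_fold, contains_dict_fold, Bool.eq_iff_iff]
  simp [PySem.Set.mem_union, PySem.Set.mem_ofList]
  tauto

-- ===== VERDICT (by name: the statement is the Claim_ definition above) =====
theorem filterLabelsTask3_spec : Claim_equal_filterLabelsTask3 := by
  intro task1 task2 task3 _ _
  exact filterLabelsTask3_spec_aux task1 task2 task3
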